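-- pv_equiv track=rewrite | github.com/Juan-D15/Web-MAGA-Purulha | webmaga/report_generator.py | generate_html_beneficiarios_region_comunidad
-- ===== SOURCE A (Python) =====
-- def generate_html_beneficiarios_region_comunidad(data):
--     """Genera HTML para beneficiarios por región/comunidad - Tabla general con saltos por comunidad"""
--     html_parts = []
--
--     if not data or len(data) == 0:
--         return '<p>No se encontraron datos para este reporte.</p>'
--
--     # Agrupar beneficiarios por comunidad
--     # En este reporte, cada elemento en data es un beneficiario individual
--     comunidades_map = {}
--     for beneficiario in data:
--         comunidad_key = beneficiario.get('comunidad', 'Sin comunidad')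
--         if comunidad_key not in comunidades_map:
--             comunidades_map[comunidad_key] = {
--                 'comunidad': comunidad_key,
--                 'region': beneficiario.get('region', '-'),
--                 'beneficiarios': []
--             }
--         comunidades_map[comunidad_key]['beneficiarios'].append(beneficiario)
--
--     if not comunidades_map:
--         return '<p>No se encontraron beneficiarios para este reporte.</p>'
--
--     # Crear tabla general
--     html_parts.append('<h2>Beneficiarios por Comunidad o Región</h2>')
--     html_parts.append('<table>')
--     html_parts.append('<thead><tr><th>Nombre</th><th>Tipo</th><th>Comunidad</th><th>Evento</th><th>DPI/Documento</th><th>Teléfono</th></tr></thead>')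
--     html_parts.append('<tbody>')
--
--     # Agregar beneficiarios agrupados por comunidad
--     for comunidad_key in sorted(comunidades_map.keys()):
--         comunidad_data = comunidades_map[comunidad_key]
--
--         # Fila de encabezado de comunidad (fila destacada con fondo gris claro)
--         html_parts.append(f'<tr style="background-color: #D0D0D0; color: #000000;">')
--         html_parts.append(f'<td colspan="6" style="font-weight: bold; padding: 8px; text-align: center;">')
--         html_parts.append(f'{comunidad_data["comunidad"]} ({comunidad_data["region"]}) - {len(comunidad_data["beneficiarios"])} beneficiario{"s" if len(comunidad_data["beneficiarios"]) != 1 else ""}')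
--         html_parts.append('</td>')
--         html_parts.append('</tr>')
--
--         # Agregar beneficiarios de esta comunidad
--         for beneficiario in comunidad_data['beneficiarios']:
--             html_parts.append('<tr>')
--             html_parts.append(f'<td>{beneficiario.get("nombre", "-")}</td>')
--             html_parts.append(f'<td>{beneficiario.get("tipo", "-")}</td>')
--             html_parts.append(f'<td>{beneficiario.get("comunidad", "-")}</td>')
--             html_parts.append(f'<td>{beneficiario.get("evento", "-")}</td>')
--             # DPI/Documento
--             html_parts.append(f'<td>{beneficiario.get("dpi", beneficiario.get("documento", "-"))}</td>')
--             # Teléfono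
--             html_parts.append(f'<td>{beneficiario.get("telefono", "-")}</td>')
--             html_parts.append('</tr>')
--
--     html_parts.append('</tbody></table>')
--
--     return '\n'.join(html_parts)
-- ===== SOURCE B (Python) =====
-- def _row_lines(b):
--     return [
--         '<tr>',
--         f'<td>{b.get("nombre", "-")}</td>',
--         f'<td>{b.get("tipo", "-")}</td>',
--         f'<td>{b.get("comunidad", "-")}</td>',
--         f'<td>{b.get("evento", "-")}</td>',
--         f'<td>{b.get("dpi", b.get("documento", "-"))}</td>',
--         f'<td>{b.get("telefono", "-")}</td>',
--         '</tr>',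
--     ]
--
--
-- def _group_lines(data, k):
--     rows = [b for b in data if b.get('comunidad', 'Sin comunidad') == k]
--     n = len(rows)
--     head = [
--         '<tr style="background-color: #D0D0D0; color: #000000;">',
--         '<td colspan="6" style="font-weight: bold; padding: 8px; text-align: center;">',
--         f'{k} ({rows[0].get("region", "-")}) - {n} beneficiario{"s" if n != 1 else ""}',
--         '</td>',
--         '</tr>',
--     ]
--     return head + [line for b in rows for line in _row_lines(b)]
--
--
-- def generate_html_beneficiarios_region_comunidad(data):
--     """Genera HTML para beneficiarios por región/comunidad - Tabla general con saltos por comunidad"""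
--     if not data:
--         return '<p>No se encontraron datos para este reporte.</p>'
--     keys = sorted({b.get('comunidad', 'Sin comunidad') for b in data})
--     parts = (
--         ['<h2>Beneficiarios por Comunidad o Región</h2>',
--          '<table>',
--          '<thead><tr><th>Nombre</th><th>Tipo</th><th>Comunidad</th><th>Evento</th><th>DPI/Documento</th><th>Teléfono</th></tr></thead>',
--          '<tbody>']
--         + [line for k in keys for line in _group_lines(data, k)]
--         + ['</tbody></table>']
--     )
--     return '\n'.join(parts)
-- ===== Notes on version B (the rewrite author's own statement) =====
-- stated objective: alternative
-- what changed: A builds a dict mapping each community to its region and accumulated beneficiary list in one pass and then walks the sorted dict keys; B instead sorts the distinct community keys and, for each key, filters the input list to get that group (taking region from the group's first row) and emits the group as a flattened segment list.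
import Mathlib
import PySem

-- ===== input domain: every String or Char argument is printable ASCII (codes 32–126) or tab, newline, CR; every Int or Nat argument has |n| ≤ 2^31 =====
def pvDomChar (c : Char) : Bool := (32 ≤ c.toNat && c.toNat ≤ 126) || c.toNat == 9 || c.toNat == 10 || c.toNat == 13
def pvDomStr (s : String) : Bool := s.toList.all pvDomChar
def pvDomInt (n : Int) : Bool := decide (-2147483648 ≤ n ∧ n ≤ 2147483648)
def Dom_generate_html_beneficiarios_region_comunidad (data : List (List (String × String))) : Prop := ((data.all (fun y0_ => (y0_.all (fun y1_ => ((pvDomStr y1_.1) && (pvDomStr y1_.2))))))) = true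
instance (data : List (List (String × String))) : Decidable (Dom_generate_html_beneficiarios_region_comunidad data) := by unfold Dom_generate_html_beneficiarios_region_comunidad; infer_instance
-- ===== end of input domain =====

-- B replaces A's one-pass dict-of-lists grouping by "sorted distinct keys, then one filter per key",
-- emitting each group as a flattened segment list; objective: alternative decomposition (not faster).


-- ===== PORT A =====
-- b.get(k, dflt) where b is a Python dict built from the given pairs (later pairs overwrite earlier ones)
def pvGetA (b : List (String × String)) (k dflt : String) : String :=
  (PySem.Dict.ofList b).getD k dflt

def pvKeyA (b : List (String × String)) : String := pvGetA b "comunidad" "Sin comunidad"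

-- one iteration of A's grouping loop over comunidades_map
def pvStepA (m : PySem.Dict String (String × String × List (List (String × String))))
    (b : List (String × String)) :
    PySem.Dict String (String × String × List (List (String × String))) :=
  let k := pvKeyA b
  let m' := if m.contains k then m else m.insert k (k, pvGetA b "region" "-", [])
  let cur := m'.getD k ("-", "-", [])
  m'.insert k (cur.1, cur.2.1, cur.2.2 ++ [b])

-- the 7 strings appended for one beneficiario row
def pvRowA (b : List (String × String)) : List String :=
  ["<tr>",
   "<td>" ++ pvGetA b "nombre" "-" ++ "</td>",
   "<td>" ++ pvGetA b "tipo" "-" ++ "</td>",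
   "<td>" ++ pvGetA b "comunidad" "-" ++ "</td>",
   "<td>" ++ pvGetA b "evento" "-" ++ "</td>",
   "<td>" ++ pvGetA b "dpi" (pvGetA b "documento" "-") ++ "</td>",
   "<td>" ++ pvGetA b "telefono" "-" ++ "</td>",
   "</tr>"]

-- the 5 strings appended as a community header (cd = comunidades_map[k])
def pvHeaderA (cd : String × String × List (List (String × String))) : List String :=
  ["<tr style=\"background-color: #D0D0D0; color: #000000;\">",
   "<td colspan=\"6\" style=\"font-weight: bold; padding: 8px; text-align: center;\">",
   cd.1 ++ " (" ++ cd.2.1 ++ ") - " ++ PySem.Int.toStr (cd.2.2.length : Int) ++ " beneficiario"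
     ++ (if (cd.2.2.length : Int) ≠ 1 then "s" else ""),
   "</td>",
   "</tr>"]

def generate_html_beneficiarios_region_comunidad (data : List (List (String × String))) : String :=
  if data = [] then "<p>No se encontraron datos para este reporte.</p>"
  else
    let m := data.foldl pvStepA PySem.Dict.empty
    if m.size = 0 then "<p>No se encontraron beneficiarios para este reporte.</p>"
    else
      let parts : List String :=
        ["<h2>Beneficiarios por Comunidad o Región</h2>",
         "<table>",
         "<thead><tr><th>Nombre</th><th>Tipo</th><th>Comunidad</th><th>Evento</th><th>DPI/Documento</th><th>Teléfono</th></tr></thead>",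
         "<tbody>"]
      let parts := (PySem.List.sorted m.keys (fun x => x) false).foldl
        (fun acc k =>
          let cd := m.getD k ("-", "-", [])
          cd.2.2.foldl (fun a b => a ++ pvRowA b) (acc ++ pvHeaderA cd)) parts
      let parts := parts ++ ["</tbody></table>"]
      PySem.Str.join "\n" parts

-- ===== PORT B =====
def pvGetB (b : List (String × String)) (k dflt : String) : String :=
  (PySem.Dict.ofList b).getD k dflt

def pvKeyB (b : List (String × String)) : String := pvGetB b "comunidad" "Sin comunidad"

def pvRowB (b : List (String × String)) : List String :=
  ["<tr>",
   "<td>" ++ pvGetB b "nombre" "-" ++ "</td>",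
   "<td>" ++ pvGetB b "tipo" "-" ++ "</td>",
   "<td>" ++ pvGetB b "comunidad" "-" ++ "</td>",
   "<td>" ++ pvGetB b "evento" "-" ++ "</td>",
   "<td>" ++ pvGetB b "dpi" (pvGetB b "documento" "-") ++ "</td>",
   "<td>" ++ pvGetB b "telefono" "-" ++ "</td>",
   "</tr>"]

-- the complete segment of lines for the community k (_group_lines in Source B)
def pvGroupB (data : List (List (String × String))) (k : String) : List String :=
  let rows := data.filter (fun b => pvKeyB b == k)
  let n : Int := (rows.length : Int)
  ["<tr style=\"background-color: #D0D0D0; color: #000000;\">",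
   "<td colspan=\"6\" style=\"font-weight: bold; padding: 8px; text-align: center;\">",
   k ++ " (" ++ pvGetB (PySem.List.pyGetD rows 0 []) "region" "-" ++ ") - "
     ++ PySem.Int.toStr n ++ " beneficiario" ++ (if n ≠ 1 then "s" else ""),
   "</td>",
   "</tr>"]
  ++ rows.flatMap pvRowB

def generate_html_beneficiarios_region_comunidad_alt (data : List (List (String × String))) : String :=
  if data = [] then "<p>No se encontraron datos para este reporte.</p>"
  else
    let keys := PySem.List.sorted (PySem.Set.ofList (data.map pvKeyB)) (fun x => x) false
    let parts : List String :=
      ["<h2>Beneficiarios por Comunidad o Región</h2>",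
       "<table>",
       "<thead><tr><th>Nombre</th><th>Tipo</th><th>Comunidad</th><th>Evento</th><th>DPI/Documento</th><th>Teléfono</th></tr></thead>",
       "<tbody>"]
      ++ keys.flatMap (pvGroupB data)
      ++ ["</tbody></table>"]
    PySem.Str.join "\n" parts

-- ===== PRECONDITION & SPEC =====
def Spec_generate_html_beneficiarios_region_comunidad (data : List (List (String × String))) (out : String) : Prop := out = generate_html_beneficiarios_region_comunidad_alt data
instance (data : List (List (String × String))) (out : String) : Decidable (Spec_generate_html_beneficiarios_region_comunidad data out) := by unfold Spec_generate_html_beneficiarios_region_comunidad; infer_instance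

-- ===== CLAIM (what is proved, stated in full; the proofs are below) =====
def Claim_equal_generate_html_beneficiarios_region_comunidad : Prop := ∀ (data : List (List (String × String))), Dom_generate_html_beneficiarios_region_comunidad data → Spec_generate_html_beneficiarios_region_comunidad data (generate_html_beneficiarios_region_comunidad data)


-- ===== LEMMAS AND PROOFS =====

-- the B-side helpers are definitionally the A-side ones
theorem pvGet_eq : pvGetB = pvGetA := rfl
theorem pvKey_eq : pvKeyB = pvKeyA := rfl
theorem pvRow_eq : pvRowB = pvRowA := rfl

theorem pv_step_keys (m : PySem.Dict String (String × String × List (List (String × String))))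
    (b : List (String × String)) :
    (pvStepA m b).keys = PySem.Set.add m.keys (pvKeyA b) := by
  unfold pvStepA
  by_cases hc : m.contains (pvKeyA b) = true
  · have hm : pvKeyA b ∈ m.keys := (PySem.Dict.contains_iff_mem_keys m _).mp hc
    simp only [hc, if_true]
    rw [PySem.Dict.keys_insert_of_contains _ _ hc]
    simp [PySem.Set.add, hm]
  · have hc' : m.contains (pvKeyA b) = false := by simpa using hc
    have hm : pvKeyA b ∉ m.keys := fun h => by
      simp [(PySem.Dict.contains_iff_mem_keys m _).mpr h] at hc'
    simp only [hc', Bool.false_eq_true, if_false]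
    rw [PySem.Dict.keys_insert_of_contains _ _ (PySem.Dict.contains_insert_self m _ _),
        PySem.Dict.keys_insert_of_not_contains _ _ hc']
    simp [PySem.Set.add, hm]

theorem pv_fold_keys (l : List (List (String × String))) :
    ∀ m : PySem.Dict String (String × String × List (List (String × String))),
    (l.foldl pvStepA m).keys = PySem.Set.update m.keys (l.map pvKeyA) := by
  induction l with
  | nil => intro m; simp [PySem.Set.update]
  | cons b t ih =>
    intro m
    rw [List.foldl_cons, ih, List.map_cons, PySem.Set.update_cons, pv_step_keys]

theorem pv_step_get_ne (m : PySem.Dict String (String × String × List (List (String × String))))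
    (b : List (String × String)) (k : String) (h : pvKeyA b ≠ k) :
    (pvStepA m b).get? k = m.get? k := by
  unfold pvStepA
  by_cases hc : m.contains (pvKeyA b) = true
  · simp only [hc, if_true]
    rw [PySem.Dict.get?_insert_of_ne _ _ (Ne.symm h)]
  · have hc' : m.contains (pvKeyA b) = false := by simpa using hc
    simp only [hc', Bool.false_eq_true, if_false]
    rw [PySem.Dict.get?_insert_of_ne _ _ (Ne.symm h),
        PySem.Dict.get?_insert_of_ne _ _ (Ne.symm h)]

theorem pv_step_get_self (m : PySem.Dict String (String × String × List (List (String × String))))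
    (b : List (String × String)) :
    (pvStepA m b).get? (pvKeyA b) =
      some (match m.get? (pvKeyA b) with
            | some cd => (cd.1, cd.2.1, cd.2.2 ++ [b])
            | none => (pvKeyA b, pvGetA b "region" "-", [b])) := by
  unfold pvStepA
  cases hg : m.get? (pvKeyA b) with
  | some cd =>
    have hc : m.contains (pvKeyA b) = true := by
      by_contra h
      have : m.get? (pvKeyA b) = none :=
        (PySem.Dict.get?_eq_none_iff_contains m _).mpr (by simpa using h)
      simp [hg] at this
    simp only [hc, if_true]
    rw [PySem.Dict.getD_eq_get?_getD, hg, PySem.Dict.get?_insert_self]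
    simp
  | none =>
    have hc : m.contains (pvKeyA b) = false :=
      (PySem.Dict.get?_eq_none_iff_contains m _).mp hg
    simp only [hc, Bool.false_eq_true, if_false]
    rw [PySem.Dict.getD_eq_get?_getD, PySem.Dict.get?_insert_self,
        PySem.Dict.get?_insert_self]
    simp

theorem pv_fold_get (l : List (List (String × String))) :
    ∀ (m : PySem.Dict String (String × String × List (List (String × String)))) (k : String),
    (l.foldl pvStepA m).get? k =
      match m.get? k, l.filter (fun b => pvKeyA b == k) with
      | some cd, f => some (cd.1, cd.2.1, cd.2.2 ++ f)
      | none, [] => none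
      | none, b0 :: _ => some (k, pvGetA b0 "region" "-", l.filter (fun b => pvKeyA b == k)) := by
  induction l with
  | nil => intro m k; cases hg : m.get? k <;> simp [hg]
  | cons b t ih =>
    intro m k
    rw [List.foldl_cons, ih]
    by_cases hk : pvKeyA b = k
    · subst hk
      rw [pv_step_get_self]
      cases hg : m.get? (pvKeyA b) with
      | some cd =>
        simp
      | none =>
        cases hf : t.filter (fun x => pvKeyA x == pvKeyA b) with
        | nil => simp [hf]
        | cons b1 t1 => simp [hf]
    · rw [pv_step_get_ne _ _ _ hk]
      have : (pvKeyA b == k) = false := by simpa using hk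
      simp [this]

theorem pv_flatMap_congr {α β : Type} {l : List α} {f g : α → List β}
    (h : ∀ x ∈ l, f x = g x) : l.flatMap f = l.flatMap g := by
  induction l with
  | nil => rfl
  | cons x t ih =>
    simp only [List.flatMap_cons]
    rw [h x (List.mem_cons_self), ih (fun y hy => h y (List.mem_cons_of_mem _ hy))]

-- ===== VERDICT (by name: the statement is the Claim_ definition above) =====
set_option maxRecDepth 8192 in
theorem generate_html_beneficiarios_region_comunidad_spec : Claim_equal_generate_html_beneficiarios_region_comunidad := by
  intro data _
  unfold Spec_generate_html_beneficiarios_region_comunidad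
  unfold generate_html_beneficiarios_region_comunidad generate_html_beneficiarios_region_comunidad_alt
  by_cases hd : data = []
  · simp [hd]
  · rw [if_neg hd, if_neg hd]
    have hkeys : (data.foldl pvStepA PySem.Dict.empty).keys
        = PySem.Set.ofList (data.map pvKeyA) := by
      rw [pv_fold_keys, PySem.Dict.keys_empty, PySem.Set.update_nil_left]
    have hne : (data.foldl pvStepA PySem.Dict.empty).keys ≠ [] := by
      rw [hkeys]
      cases data with
      | nil => exact absurd rfl hd
      | cons b t => simp [PySem.Set.ofList_cons]
    have hsz : (data.foldl pvStepA PySem.Dict.empty).size ≠ 0 := by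
      have : (data.foldl pvStepA PySem.Dict.empty).size
          = (data.foldl pvStepA PySem.Dict.empty).keys.length := by
        simp [PySem.Dict.size, PySem.Dict.keys]
      rw [this]
      simpa [List.length_eq_zero_iff] using hne
    rw [if_neg hsz]
    apply congrArg (PySem.Str.join "\n")
    simp only [PySem.List.foldl_append_eq_flatMap, List.append_assoc, hkeys, ← pvKey_eq]
    congr 2
    apply pv_flatMap_congr
    intro k hk
    have hkmem : k ∈ data.map pvKeyB := by
      have := (PySem.List.mem_sorted _ _ _ _).mp hk
      exact (PySem.Set.mem_ofList _ _).mp this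
    obtain ⟨b, hb, hbk⟩ := List.mem_map.mp hkmem
    have hbmem : b ∈ data.filter (fun x => pvKeyA x == k) := by
      rw [List.mem_filter]
      exact ⟨hb, by simp [← pvKey_eq, hbk]⟩
    cases hrows : data.filter (fun x => pvKeyA x == k) with
    | nil => rw [hrows] at hbmem; exact absurd hbmem (List.not_mem_nil)
    | cons b0 rest =>
      have hget : (data.foldl pvStepA PySem.Dict.empty).get? k
          = some (k, pvGetA b0 "region" "-", b0 :: rest) := by
        rw [pv_fold_get]
        simp [PySem.Dict.get?_empty, hrows]
      have hgetD : (data.foldl pvStepA PySem.Dict.empty).getD k ("-", "-", [])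
          = (k, pvGetA b0 "region" "-", b0 :: rest) := by
        rw [PySem.Dict.getD_eq_get?_getD, hget]; rfl
      rw [hgetD]
      unfold pvGroupB pvHeaderA
      rw [← pvKey_eq] at hrows
      simp [hrows, ← pvGet_eq, ← pvRow_eq, PySem.List.pyGetD_zero_cons]
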